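-- pv_equiv track=rewrite | github.com/aryansharma2709/fde-o2c-graph | scripts/inspect_dataset.py | detect_join_patterns
-- ===== SOURCE A (Python) =====
-- from collections import defaultdict
-- from typing import Any, Dict, List, Set
--
-- def detect_join_patterns(collections: Dict[str, Dict]) -> List[str]:
--     """Look for potential join patterns in column names across collections."""
--     patterns = []
--     all_columns_by_col_name = defaultdict(list)
--
--     for coll_name, info in collections.items():
--         for col in info["columns"]:
--             all_columns_by_col_name[col].append(coll_name)
--
--     # Find columns that appear in multiple collections (likely FKs)
--     for col_name, appearances in all_columns_by_col_name.items():
--         if len(appearances) > 1: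
--             patterns.append(f"Column '{col_name}' appears in: {', '.join(appearances)}")
--
--     return sorted(patterns)
-- ===== SOURCE B (Python) =====
-- def detect_join_patterns(collections):
--     """Look for potential join patterns in column names across collections."""
--     pairs = sorted(
--         [(col, coll_name) for coll_name, info in collections.items() for col in info["columns"]],
--         key=lambda p: p[0])  # stable, keyed on the column name only
--     patterns = []
--     rest = pairs
--     while rest:
--         col = rest[0][0]
--         run = []
--         while rest and rest[0][0] == col:
--             run.append(rest[0][1])
--             rest = rest[1:]
--         if len(run) > 1:
--             patterns.append(f"Column '{col}' appears in: {', '.join(run)}")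
--     return sorted(patterns)
-- ===== Notes on version B (the rewrite author's own statement) =====
-- stated objective: alternative
-- what changed: B replaces A's defaultdict grouping (dict column -> list of collection names, then a scan over its items) by a flat (column, collection) pair list that is stable-sorted on the column name only and then cut into consecutive equal-column runs in a single scan.
import Mathlib
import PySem

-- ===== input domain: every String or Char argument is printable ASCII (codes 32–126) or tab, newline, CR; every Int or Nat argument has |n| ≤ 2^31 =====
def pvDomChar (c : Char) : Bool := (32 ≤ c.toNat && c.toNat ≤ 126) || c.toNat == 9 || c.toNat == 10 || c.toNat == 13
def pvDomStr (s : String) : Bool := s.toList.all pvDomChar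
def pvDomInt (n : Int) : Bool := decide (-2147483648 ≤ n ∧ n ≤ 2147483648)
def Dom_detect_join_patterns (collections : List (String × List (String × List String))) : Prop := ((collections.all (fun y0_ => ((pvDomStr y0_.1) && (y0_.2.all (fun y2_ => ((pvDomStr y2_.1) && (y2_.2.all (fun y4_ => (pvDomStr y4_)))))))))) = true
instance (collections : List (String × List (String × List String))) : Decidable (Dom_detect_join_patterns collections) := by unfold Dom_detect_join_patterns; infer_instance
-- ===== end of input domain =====

-- B replaces A's defaultdict grouping (dict column -> list of collections, then a scan over its
-- items) by a flat (column, collection) pair list, a stable sort keyed on the column name only,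
-- and a single scan over the sorted list that cuts it into consecutive equal-column runs
-- (objective: alternative — structurally different, not faster).

-- the f-string both sources contain: f"Column '{col}' appears in: {', '.join(apps)}"
def pvPattern (c : String) (apps : List String) : String :=
  PySem.Str.join "" ["Column '", c, "' appears in: ", PySem.Str.join ", " apps]

-- ===== PORT A =====
def detect_join_patterns (collections : List (String × List (String × List String))) : List String :=
  -- all_columns_by_col_name : defaultdict(list); d[col].append(coll_name)
  let d : PySem.Dict String (List String) :=
    collections.foldl
      (fun d ci =>
        (((PySem.Dict.ofList ci.2).get? "columns").getD []).foldl
          (fun d col => d.modify col [] (fun l => l ++ [ci.1])) d)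
      PySem.Dict.empty
  let patterns : List String :=
    d.items.foldl (fun acc it => if it.2.length > 1 then acc ++ [pvPattern it.1 it.2] else acc) []
  PySem.List.sorted patterns (fun s => s)

-- ===== PORT B =====
-- the two nested while loops of Source B: the inner one collects the leading run of pairs whose
-- column equals the head's column (takeWhile/dropWhile is that loop, step for step), the outer
-- one recurses on what is left
def pvGroupRuns : List (String × String) → List String
  | [] => []
  | (c, n) :: t =>
    let run : List String := n :: (t.takeWhile (fun p => p.1 == c)).map (·.2)
    (if run.length > 1 then [pvPattern c run] else []) ++
      pvGroupRuns (t.dropWhile (fun p => p.1 == c))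
termination_by s => s.length
decreasing_by
  have := List.length_dropWhile_le (fun p : String × String => p.1 == c) t
  simp; omega

def detect_join_patterns_alt (collections : List (String × List (String × List String))) : List String :=
  let pairs : List (String × String) :=
    PySem.List.sorted
      (collections.flatMap (fun ci =>
        (((PySem.Dict.ofList ci.2).get? "columns").getD []).map (fun col => (col, ci.1))))
      (fun p => p.1)
  PySem.List.sorted (pvGroupRuns pairs) (fun s => s)

-- ===== PRECONDITION & SPEC =====
-- Pre_ excludes exactly the inputs where Python raises: info["columns"] is a KeyError
-- when some collection's info dict has no "columns" key.
def Pre_detect_join_patterns (collections : List (String × List (String × List String))) : Prop :=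
  ∀ p ∈ collections, "columns" ∈ p.2.map Prod.fst
instance (collections : List (String × List (String × List String))) : Decidable (Pre_detect_join_patterns collections) := by unfold Pre_detect_join_patterns; infer_instance

def pvWitness_detect_join_patterns : (List (String × List (String × List String))) :=
  [("orders", [("columns", ["id", "user_id"])]), ("users", [("columns", ["id"])])]

def Spec_detect_join_patterns (collections : List (String × List (String × List String))) (out : List String) : Prop := out = detect_join_patterns_alt collections
instance (collections : List (String × List (String × List String))) (out : List String) : Decidable (Spec_detect_join_patterns collections out) := by unfold Spec_detect_join_patterns; infer_instance

-- ===== CLAIM (what is proved, stated in full; the proofs are below) =====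
def Claim_equal_detect_join_patterns : Prop := ∀ (collections : List (String × List (String × List String))), Dom_detect_join_patterns collections → Pre_detect_join_patterns collections → Spec_detect_join_patterns collections (detect_join_patterns collections)

-- ===== LEMMAS AND PROOFS =====

-- abbreviations used throughout: the pair list, the names grouped under one column, the pattern
def pvApps (P : List (String × String)) (c : String) : List String :=
  (P.filter (fun p => p.1 == c)).map (·.2)

-- the distinct column names of a key-sorted pair list, one per consecutive run (proof-only)
def pvRunHeads : List (String × String) → List String
  | [] => []
  | (c, _) :: t => c :: pvRunHeads (t.dropWhile (fun p => p.1 == c))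
termination_by s => s.length
decreasing_by
  have := List.length_dropWhile_le (fun p : String × String => p.1 == c) t
  simp; omega

-- A's nested dict-building loop is the flat fold over B's pair list.
theorem pv_dict_eq (collections : List (String × List (String × List String))) :
    collections.foldl
      (fun d ci =>
        (((PySem.Dict.ofList ci.2).get? "columns").getD []).foldl
          (fun d col => d.modify col [] (fun l => l ++ [ci.1])) d)
      (PySem.Dict.empty : PySem.Dict String (List String))
    = (collections.flatMap (fun ci =>
        (((PySem.Dict.ofList ci.2).get? "columns").getD []).map (fun col => (col, ci.1)))).foldl
        (fun d p => d.modify p.1 [] (fun l => l ++ [p.2])) PySem.Dict.empty := by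
  rw [List.foldl_flatMap]
  simp [List.foldl_map]

-- A's pattern list, in canonical form: one pattern per distinct column (first-appearance order)
theorem pv_patternsA (P : List (String × String)) :
    (((P.foldl (fun d p => d.modify p.1 [] (fun l => l ++ [p.2]))
        (PySem.Dict.empty : PySem.Dict String (List String))).items).foldl
      (fun acc it => if it.2.length > 1 then acc ++ [pvPattern it.1 it.2] else acc) [])
    = ((PySem.List.dedup (P.map (·.1))).filter
        (fun c => decide ((pvApps P c).length > 1))).map (fun c => pvPattern c (pvApps P c)) := by
  set d := P.foldl (fun d p => d.modify p.1 [] (fun l => l ++ [p.2]))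
      (PySem.Dict.empty : PySem.Dict String (List String)) with hd
  have hnd : d.keys.Nodup := by
    rw [hd]
    exact PySem.Dict.nodup_keys_foldl_modify_key P Prod.fst []
      (fun _ p v => v ++ [p.2]) PySem.Dict.empty (by simp [PySem.Dict.empty, PySem.Dict.keys])
  have hkeys : d.keys = PySem.List.dedup (P.map (·.1)) := by
    rw [hd, PySem.Dict.keys_foldl_modify_key P Prod.fst [] (fun _ p v => v ++ [p.2])]
    rfl
  have hgetD : ∀ c, d.getD c [] = pvApps P c := by
    intro c
    rw [hd, PySem.Dict.getD_foldl_modify_append]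
    simp [PySem.Dict.empty, PySem.Dict.getD, PySem.Dict.get?, pvApps]
  have hitems : d.items = d.keys.map (fun k => (k, d.getD k [])) :=
    PySem.Dict.items_eq_map_keys d hnd []
  rw [hitems, hkeys]
  have hA := PySem.List.foldl_append_if
      (fun it : String × List String => decide (it.2.length > 1))
      (fun it => pvPattern it.1 it.2)
      ((PySem.List.dedup (P.map (·.1))).map (fun k => (k, d.getD k []))) []
  simp only [decide_eq_true_eq] at hA
  rw [hA]
  simp only [List.nil_append, List.filter_map, List.map_map]
  congr 1
  · funext c; simp [Function.comp, hgetD]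
  · apply List.filter_congr
    intro c _; simp [Function.comp, hgetD]

-- stability of Python's sort: filtering one key class commutes with sorting by that key
theorem pv_insertBy_pairwise (x : String × String) (acc : List (String × String))
    (hacc : acc.Pairwise (fun a b => a.1 ≤ b.1)) :
    (PySem.List.insertBy (fun a b => decide (a.1 < b.1)) x acc).Pairwise (fun a b => a.1 ≤ b.1) := by
  induction acc with
  | nil => rw [PySem.List.insertBy]; simp
  | cons y t ih =>
    rw [List.pairwise_cons] at hacc
    obtain ⟨hy, ht⟩ := hacc
    rw [PySem.List.insertBy]
    split
    · rename_i hlt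
      simp only [decide_eq_true_eq] at hlt
      refine List.Pairwise.cons ?_ (List.Pairwise.cons hy ht)
      intro b hb
      rcases List.mem_cons.1 hb with h | h
      · exact le_of_lt (h ▸ hlt)
      · exact le_of_lt (lt_of_lt_of_le hlt (hy b h))
    · rename_i hge
      simp only [decide_eq_true_eq, not_lt] at hge
      refine List.Pairwise.cons ?_ (ih ht)
      intro b hb
      rcases (PySem.List.mem_insertBy _ x b t).1 hb with h | h
      · exact h ▸ hge
      · exact hy b h

theorem pv_insertBy_filter (c : String) (x : String × String) (acc : List (String × String))
    (hacc : acc.Pairwise (fun a b => a.1 ≤ b.1)) :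
    (PySem.List.insertBy (fun a b => decide (a.1 < b.1)) x acc).filter (fun p => p.1 == c)
    = if x.1 == c then acc.filter (fun p => p.1 == c) ++ [x]
      else acc.filter (fun p => p.1 == c) := by
  induction acc with
  | nil =>
    rw [PySem.List.insertBy]
    by_cases h : x.1 = c
    · simp [List.filter, h]
    · simp [List.filter, beq_eq_false_iff_ne.mpr h]
  | cons y t ih =>
    rw [List.pairwise_cons] at hacc
    obtain ⟨hy, ht⟩ := hacc
    rw [PySem.List.insertBy]
    split
    · rename_i hlt
      simp only [decide_eq_true_eq] at hlt
      by_cases hxc : x.1 = c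
      · have hnil : (y :: t).filter (fun p => p.1 == c) = [] := by
          rw [List.filter_eq_nil_iff]
          intro a ha
          rcases List.mem_cons.1 ha with h | h
          · simp [h, (hxc ▸ hlt).ne']
          · have : x.1 < a.1 := lt_of_lt_of_le hlt (hy a h)
            simp [(hxc ▸ this).ne']
        simp [hxc, hnil]
      · by_cases hyc : y.1 = c <;> simp [beq_eq_false_iff_ne.mpr hxc, hyc, List.filter]
    · rename_i hge
      rw [List.filter_cons, List.filter_cons, ih ht]
      by_cases hxc : x.1 = c <;> by_cases hyc : y.1 = c <;> simp [hxc, hyc]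

theorem pv_sorted_filter (P : List (String × String)) (c : String) :
    (PySem.List.sorted P (fun p => p.1)).filter (fun p => p.1 == c)
    = P.filter (fun p => p.1 == c) := by
  rw [PySem.List.sorted_eq_foldl_insertBy]
  have key : ∀ (L : List (String × String)) (acc : List (String × String)),
      acc.Pairwise (fun a b => a.1 ≤ b.1) →
      (L.foldl (fun acc x => PySem.List.insertBy (fun a b => decide (a.1 < b.1)) x acc)
        acc).filter (fun p => p.1 == c)
      = acc.filter (fun p => p.1 == c) ++ L.filter (fun p => p.1 == c) := by
    intro L
    induction L with
    | nil => intro acc _; simp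
    | cons x L ih =>
      intro acc hacc
      rw [List.foldl_cons, ih _ (pv_insertBy_pairwise x acc hacc),
        pv_insertBy_filter c x acc hacc, List.filter_cons]
      by_cases hxc : x.1 = c
      · simp [hxc]
      · simp [beq_eq_false_iff_ne.mpr hxc]
  simpa using key P [] (by simp)

-- in a key-sorted list whose keys all dominate c, the c-run is a prefix
theorem pv_filter_eq_takeWhile (c : String) (t : List (String × String))
    (hp : t.Pairwise (fun a b => a.1 ≤ b.1)) (hall : ∀ p ∈ t, c ≤ p.1) :
    t.filter (fun p => p.1 == c) = t.takeWhile (fun p => p.1 == c) := by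
  induction t with
  | nil => rfl
  | cons x r ih =>
    rw [List.pairwise_cons] at hp
    obtain ⟨hx, hr⟩ := hp
    by_cases hxc : x.1 = c
    · rw [List.filter_cons, List.takeWhile_cons,
        ih hr (fun p hpmem => hall p (List.mem_cons_of_mem x hpmem))]
      simp [hxc]
    · have hclt : c < x.1 := lt_of_le_of_ne (hall x (List.mem_cons_self)) (Ne.symm hxc)
      have hnil : (x :: r).filter (fun p => p.1 == c) = [] := by
        rw [List.filter_eq_nil_iff]
        intro a ha
        rcases List.mem_cons.1 ha with h | h
        · simp [h, hxc]
        · exact by simp [(lt_of_lt_of_le hclt (hx a h)).ne']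
      rw [hnil, List.takeWhile_cons]
      simp [beq_eq_false_iff_ne.mpr hxc]

theorem pv_dropWhile_ne (c : String) (t : List (String × String))
    (hp : t.Pairwise (fun a b => a.1 ≤ b.1)) (hall : ∀ p ∈ t, c ≤ p.1) :
    ∀ p ∈ t.dropWhile (fun p => p.1 == c), p.1 ≠ c := by
  induction t with
  | nil => simp
  | cons x r ih =>
    rw [List.pairwise_cons] at hp
    obtain ⟨hx, hr⟩ := hp
    by_cases hxc : x.1 = c
    · rw [List.dropWhile_cons_of_pos (by simp [hxc])]
      exact ih hr (fun p hpmem => hall p (List.mem_cons_of_mem x hpmem))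
    · rw [List.dropWhile_cons_of_neg (by simp [hxc])]
      have hclt : c < x.1 := lt_of_le_of_ne (hall x (List.mem_cons_self)) (Ne.symm hxc)
      intro p hpmem
      rcases List.mem_cons.1 hpmem with h | h
      · exact h ▸ hxc
      · exact (lt_of_lt_of_le hclt (hx p h)).ne'

theorem pv_mem_runHeads (S : List (String × String)) (c : String) :
    c ∈ pvRunHeads S ↔ c ∈ S.map (·.1) := by
  induction S using pvRunHeads.induct with
  | case1 => simp [pvRunHeads]
  | case2 c' n t ih =>
    rw [pvRunHeads]
    have hsplit := List.takeWhile_append_dropWhile (p := fun p : String × String => p.1 == c') (l := t)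
    constructor
    · intro h
      rcases List.mem_cons.1 h with h | h
      · simp [h]
      · have := ih.1 h
        rw [List.map_cons, List.mem_cons]
        right
        rw [← hsplit, List.map_append, List.mem_append]
        exact Or.inr this
    · intro h
      rw [List.map_cons, List.mem_cons] at h
      rcases h with h | h
      · exact List.mem_cons.2 (Or.inl h)
      · rw [← hsplit, List.map_append, List.mem_append] at h
        rcases h with h | h
        · rcases List.mem_map.1 h with ⟨p, hp, hpc⟩
          have hpc' : p.1 = c' := by simpa using (List.mem_takeWhile_imp hp)
          exact List.mem_cons.2 (Or.inl (by rw [← hpc, hpc']))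
        · exact List.mem_cons.2 (Or.inr (ih.2 h))

theorem pv_nodup_runHeads (S : List (String × String))
    (hp : S.Pairwise (fun a b => a.1 ≤ b.1)) : (pvRunHeads S).Nodup := by
  induction S using pvRunHeads.induct with
  | case1 => simp [pvRunHeads]
  | case2 c n t ih =>
    rw [List.pairwise_cons] at hp
    obtain ⟨hx, ht⟩ := hp
    rw [pvRunHeads, List.nodup_cons]
    have hrest : (t.dropWhile (fun p => p.1 == c)).Pairwise (fun a b => a.1 ≤ b.1) :=
      List.Pairwise.sublist (List.dropWhile_sublist _) ht
    refine ⟨?_, ih hrest⟩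
    intro hmem
    rcases List.mem_map.1 ((pv_mem_runHeads _ c).1 hmem) with ⟨p, hpmem, hpc⟩
    exact pv_dropWhile_ne c t ht (fun p h => hx p h) p hpmem hpc

theorem pv_filter_map_congr {l : List String} {p q : String → Bool}
    {f g : String → String} (hpq : ∀ x ∈ l, p x = q x) (hfg : ∀ x ∈ l, f x = g x) :
    (l.filter p).map f = (l.filter q).map g := by
  rw [List.filter_congr hpq]
  exact List.map_congr_left (fun x hx => hfg x (List.mem_of_mem_filter hx))

-- B's run-cutting scan, in the same canonical form (indexed by run heads)
theorem pv_groupRuns_eq (S : List (String × String))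
    (hp : S.Pairwise (fun a b => a.1 ≤ b.1)) :
    pvGroupRuns S
    = ((pvRunHeads S).filter (fun c => decide ((pvApps S c).length > 1))).map
        (fun c => pvPattern c (pvApps S c)) := by
  induction S using pvGroupRuns.induct with
  | case1 => simp [pvGroupRuns, pvRunHeads]
  | case2 c n t ih =>
    rw [List.pairwise_cons] at hp
    obtain ⟨hx, ht⟩ := hp
    have hrest : (t.dropWhile (fun p => p.1 == c)).Pairwise (fun a b => a.1 ≤ b.1) :=
      List.Pairwise.sublist (List.dropWhile_sublist _) ht
    have htw : t.filter (fun p => p.1 == c) = t.takeWhile (fun p => p.1 == c) :=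
      pv_filter_eq_takeWhile c t ht (fun p h => hx p h)
    have hrun : pvApps ((c, n) :: t) c
        = n :: (t.takeWhile (fun p => p.1 == c)).map (·.2) := by
      unfold pvApps
      rw [List.filter_cons, ← htw]
      simp
    have happs' : ∀ c' ∈ pvRunHeads (t.dropWhile (fun p => p.1 == c)),
        pvApps ((c, n) :: t) c' = pvApps (t.dropWhile (fun p => p.1 == c)) c' := by
      intro c' hc'
      rcases List.mem_map.1 ((pv_mem_runHeads _ c').1 hc') with ⟨p, hpmem, hpc⟩
      have hne : c' ≠ c := hpc ▸ pv_dropWhile_ne c t ht (fun p h => hx p h) p hpmem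
      unfold pvApps
      rw [List.filter_cons]
      have h1 : (((c, n) : String × String).1 == c') = false :=
        beq_eq_false_iff_ne.mpr (Ne.symm hne)
      rw [h1]
      simp only [Bool.false_eq_true, if_false]
      conv_lhs => rw [← List.takeWhile_append_dropWhile
        (p := fun p : String × String => p.1 == c) (l := t)]
      rw [List.filter_append]
      have h2 : (t.takeWhile (fun p => p.1 == c)).filter (fun p => p.1 == c') = [] := by
        rw [List.filter_eq_nil_iff]
        intro a ha
        have ha' : a.1 = c := by simpa using (List.mem_takeWhile_imp ha)
        simp [ha', Ne.symm hne]
      rw [h2, List.nil_append]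
    rw [pvGroupRuns, pvRunHeads, List.filter_cons]
    have hlen : (pvApps ((c, n) :: t) c).length
        = (n :: (t.takeWhile (fun p => p.1 == c)).map (·.2)).length := by rw [hrun]
    by_cases hgt : (n :: (t.takeWhile (fun p => p.1 == c)).map (·.2)).length > 1
    · rw [if_pos hgt]
      have hb : (decide ((pvApps ((c, n) :: t) c).length > 1)) = true := by
        rw [hlen]; exact decide_eq_true hgt
      rw [hb, if_pos rfl, List.map_cons, hrun, List.singleton_append]
      congr 1
      rw [ih hrest]
      apply pv_filter_map_congr
      · intro x hxm; rw [happs' x hxm]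
      · intro x hxm; rw [happs' x hxm]
    · rw [if_neg hgt]
      have hb : (decide ((pvApps ((c, n) :: t) c).length > 1)) = false := by
        rw [hlen]; exact decide_eq_false hgt
      rw [hb, if_neg (by simp), List.nil_append]
      rw [ih hrest]
      apply pv_filter_map_congr
      · intro x hxm; rw [happs' x hxm]
      · intro x hxm; rw [happs' x hxm]

-- ===== VERDICT (by name: the statement is the Claim_ definition above) =====
theorem detect_join_patterns_spec : Claim_equal_detect_join_patterns := by
  intro collections _ _
  unfold Spec_detect_join_patterns detect_join_patterns detect_join_patterns_alt
  dsimp only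
  rw [pv_dict_eq]
  set P := collections.flatMap (fun ci =>
      (((PySem.Dict.ofList ci.2).get? "columns").getD []).map (fun col => (col, ci.1))) with hP
  set S := PySem.List.sorted P (fun p => p.1) with hS
  have hpS : S.Pairwise (fun a b => a.1 ≤ b.1) := PySem.List.sorted_pairwise P (fun p => p.1)
  rw [pv_patternsA, pv_groupRuns_eq S hpS]
  have happs : ∀ c, pvApps S c = pvApps P c := by
    intro c; unfold pvApps; rw [hS, pv_sorted_filter]
  have h1 : ((pvRunHeads S).filter (fun c => decide ((pvApps S c).length > 1))).map
      (fun c => pvPattern c (pvApps S c))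
      = ((pvRunHeads S).filter (fun c => decide ((pvApps P c).length > 1))).map
        (fun c => pvPattern c (pvApps P c)) := by
    simp only [happs]
  rw [h1]
  apply (PySem.List.sorted_id_eq_sorted_id_iff_perm _ _).2
  apply List.Perm.map
  apply List.Perm.filter
  rw [List.perm_ext_iff_of_nodup (PySem.List.nodup_dedup _) (pv_nodup_runHeads S hpS)]
  intro c
  rw [PySem.List.mem_dedup, pv_mem_runHeads]
  have : (S.map (·.1)).Perm (P.map (·.1)) := (PySem.List.sorted_perm P (fun p => p.1) false).map _
  exact this.mem_iff.symm
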